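-- pv_equiv track=rewrite | github.com/skehg/Xrev-pyRevit | pyXrev Project Tools.tab/Family Management.panel/Create Edit Parameters.pushbutton/script.py | _selected_token_range
-- ===== SOURCE A (Python) =====
-- def _selected_token_range(text, caret):
--     if text is None:
--         return None
--
--     n = len(text)
--     if caret < 0:
--         caret = 0
--     if caret > n:
--         caret = n
--
--     left = caret - 1
--     while left >= 0 and _is_token_char(text[left]):
--         left -= 1
--     left += 1
--
--     right = caret
--     while right < n and _is_token_char(text[right]):
--         right += 1
--
--     if left >= right:
--         return None
--     return (left, right)
--
-- def _is_token_char(ch):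
--     return ch.isalnum() or ch == "_"
-- ===== SOURCE B (Python) =====
-- def _is_token_char(ch):
--     return ch.isalnum() or ch == "_"
--
-- def _selected_token_range(text, caret):
--     if text is None:
--         return None
--     n = len(text)
--     caret = max(0, min(caret, n))
--     spans = []
--     start = None
--     for i, ch in enumerate(text):
--         if _is_token_char(ch):
--             if start is None:
--                 start = i
--         elif start is not None:
--             spans.append((start, i))
--             start = None
--     if start is not None:
--         spans.append((start, n))
--     for s, e in spans:
--         if s <= caret <= e:
--             return (s, e)
--     return None
-- ===== Notes on version B (the rewrite author's own statement) =====
-- stated objective: alternative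
-- what changed: A scans left and right from the caret with two while-loops; B makes one forward pass collecting all maximal token runs as (start, end) spans and then returns the span that touches the clamped caret, or None.
import Mathlib
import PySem

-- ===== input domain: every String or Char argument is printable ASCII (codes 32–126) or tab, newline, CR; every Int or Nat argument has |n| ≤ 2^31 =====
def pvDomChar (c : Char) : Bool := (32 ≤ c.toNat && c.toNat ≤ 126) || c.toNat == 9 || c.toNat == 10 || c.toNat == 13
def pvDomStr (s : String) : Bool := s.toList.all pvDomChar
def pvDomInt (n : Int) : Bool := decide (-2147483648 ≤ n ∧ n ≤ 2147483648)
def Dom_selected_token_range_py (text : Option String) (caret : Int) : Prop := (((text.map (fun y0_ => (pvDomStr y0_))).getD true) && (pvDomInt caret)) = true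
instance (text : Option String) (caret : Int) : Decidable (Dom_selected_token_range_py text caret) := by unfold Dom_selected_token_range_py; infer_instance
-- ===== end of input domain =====

-- B replaces A's two caret-anchored while-loop scans by one forward pass that collects all
-- maximal token runs as (start, end) spans and then picks the span touching the clamped caret
-- (objective: alternative decomposition; not faster).

-- ===== PORT A =====
def pvIsTok (c : Char) : Bool := PySem.Chars.isalnum c || c == '_'

-- A's left while-loop; argument k = left + 1, so `pvScanLeft cs caret` is the final left after `left += 1`
def pvScanLeft (cs : List Char) : Nat → Nat
  | 0 => 0
  | k+1 => if h : k < cs.length then (if pvIsTok cs[k] then pvScanLeft cs k else k+1) else k+1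

-- A's right while-loop; fuel = cs.length - r bounds the remaining iterations
def pvScanRight (cs : List Char) : Nat → Nat → Nat
  | 0, r => r
  | fuel+1, r => if h : r < cs.length then (if pvIsTok cs[r] then pvScanRight cs fuel (r+1) else r) else r

def selected_token_range_py (text : Option String) (caret : Int) : Option (Int × Int) :=
  match text with
  | none => none
  | some s =>
    let cs := s.toList
    let n : Int := cs.length
    let caret1 : Int := if caret < 0 then 0 else caret
    let caret2 : Int := if caret1 > n then n else caret1
    -- caret2 ∈ [0, n] by A's two clamps, so .toNat is exact
    let c : Nat := caret2.toNat
    let left := pvScanLeft cs c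
    let right := pvScanRight cs (cs.length - c) c
    if right ≤ left then none else some ((left : Int), (right : Int))

-- ===== PORT B =====
-- B's forward pass: i is the current index, st the start of the currently open token run (if any)
def pvSpansAux : List Char → Nat → Option Nat → List (Nat × Nat)
  | [], i, st => match st with | some s => [(s, i)] | none => []
  | ch :: rest, i, st =>
    if pvIsTok ch then pvSpansAux rest (i+1) (some (st.getD i))
    else match st with
      | some s => (s, i) :: pvSpansAux rest (i+1) none
      | none => pvSpansAux rest (i+1) none

def selected_token_range_py_alt (text : Option String) (caret : Int) : Option (Int × Int) :=
  match text with
  | none => none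
  | some s =>
    let cs := s.toList
    let n : Int := cs.length
    let c : Nat := (max 0 (min caret n)).toNat
    let spans := pvSpansAux cs 0 none
    (spans.find? (fun p => decide (p.1 ≤ c) && decide (c ≤ p.2))).map
      (fun p => ((p.1 : Int), (p.2 : Int)))

-- ===== PRECONDITION & SPEC =====
def Spec_selected_token_range_py (text : Option String) (caret : Int) (out : Option (Int × Int)) : Prop := out = selected_token_range_py_alt text caret
instance (text : Option String) (caret : Int) (out : Option (Int × Int)) : Decidable (Spec_selected_token_range_py text caret out) := by unfold Spec_selected_token_range_py; infer_instance

-- ===== CLAIM (what is proved, stated in full; the proofs are below) =====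
def Claim_equal_selected_token_range_py : Prop := ∀ (text : Option String) (caret : Int), Dom_selected_token_range_py text caret → Spec_selected_token_range_py text caret (selected_token_range_py text caret)

-- ===== LEMMAS AND PROOFS =====

-- length of the maximal token prefix
def pvTw : List Char → Nat
  | [] => 0
  | a :: r => if pvIsTok a then pvTw r + 1 else 0

-- length of the maximal token suffix
def pvTwr (l : List Char) : Nat := pvTw l.reverse

theorem pvTw_le (l : List Char) : pvTw l ≤ l.length := by
  induction l with
  | nil => simp [pvTw]
  | cons a r ih => simp only [pvTw, List.length_cons]; split <;> omega

theorem pvTwr_le (l : List Char) : pvTwr l ≤ l.length := by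
  simpa [pvTwr] using pvTw_le l.reverse

theorem pvTw_append (xs ys : List Char) :
    pvTw (xs ++ ys) = if pvTw xs = xs.length then xs.length + pvTw ys else pvTw xs := by
  induction xs with
  | nil => simp [pvTw]
  | cons a r ih =>
    by_cases ha : pvIsTok a
    · have hle := pvTw_le r
      simp only [List.cons_append, pvTw, ha, if_true, ih, List.length_cons]
      split_ifs <;> omega
    · have h1 : pvTw (a :: (r ++ ys)) = 0 := by simp [pvTw, ha]
      have h2 : pvTw (a :: r) = 0 := by simp [pvTw, ha]
      rw [List.cons_append, h1, h2, if_neg (by simp only [List.length_cons]; omega)]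

theorem pvTw_drop (l : List Char) (k : Nat) (h : k ≤ pvTw l) : pvTw (l.drop k) = pvTw l - k := by
  induction l generalizing k with
  | nil => simp only [pvTw, Nat.le_zero] at h; subst h; simp [pvTw]
  | cons a r ih =>
    cases k with
    | zero => simp
    | succ k =>
      simp only [pvTw] at h ⊢
      by_cases ha : pvIsTok a
      · simp only [ha, if_true] at h ⊢
        rw [List.drop_succ_cons, ih k (by omega)]
        omega
      · simp [ha] at h

theorem pvTw_getElem (l : List Char) (h : pvTw l < l.length) : pvIsTok (l[pvTw l]'h) = false := by
  induction l with
  | nil => simp at h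
  | cons a r ih =>
    by_cases ha : pvIsTok a
    · have h' : pvTw (a :: r) = pvTw r + 1 := by simp [pvTw, ha]
      have hr : pvTw r < r.length := by simp [h'] at h; omega
      have := ih hr
      simp_all
    · simp_all [pvTw]

theorem pvTw_lt_of_mem (l : List Char) (x : Char) (hx : x ∈ l) (hnx : pvIsTok x = false) :
    pvTw l < l.length := by
  induction l with
  | nil => simp at hx
  | cons a r ih =>
    rcases List.mem_cons.mp hx with rfl | hmem
    · simp [pvTw, hnx]
    · have := pvTw_le r
      simp only [pvTw, List.length_cons]; split
      · exact Nat.succ_lt_succ (ih hmem)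
      · omega

theorem pvTw_take_mem (l : List Char) (k : Nat) (hk : k ≤ pvTw l) (x : Char)
    (hx : x ∈ l.take k) : pvIsTok x = true := by
  induction l generalizing k with
  | nil => simp at hx
  | cons a r ih =>
    cases k with
    | zero => simp at hx
    | succ k =>
      simp only [pvTw] at hk
      by_cases ha : pvIsTok a
      · simp only [ha, if_true] at hk
        rcases List.mem_cons.mp (by simpa using hx) with rfl | hmem
        · exact ha
        · exact ih k (by omega) hmem
      · simp [ha] at hk

theorem pvTwr_cons_neg (a : Char) (l : List Char) (h : pvIsTok a = false) :
    pvTwr (a :: l) = pvTwr l := by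
  have hap := pvTw_append l.reverse [a]
  have h1 : pvTw [a] = 0 := by simp [pvTw, h]
  simp only [pvTwr, List.reverse_cons]
  rw [hap, h1]
  split_ifs with hc
  · simp only [List.length_reverse] at hc ⊢; omega
  · rfl

theorem pvTwr_concat_pos (xs : List Char) (a : Char) (h : pvIsTok a = true) :
    pvTwr (xs ++ [a]) = pvTwr xs + 1 := by
  simp [pvTwr, List.reverse_append, pvTw, h]

theorem pvTwr_concat_neg (xs : List Char) (a : Char) (h : pvIsTok a = false) :
    pvTwr (xs ++ [a]) = 0 := by
  simp [pvTwr, List.reverse_append, pvTw, h]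

theorem pvTwr_append_of_lt (xs ys : List Char) (h : pvTwr ys ≠ ys.length) :
    pvTwr (xs ++ ys) = pvTwr ys := by
  have := pvTw_append ys.reverse xs.reverse
  simp only [pvTwr, List.reverse_append, this, List.length_reverse]
  split_ifs with hc
  · exact absurd hc h
  · rfl

theorem pvTw_all (l : List Char) (h : ∀ x ∈ l, pvIsTok x = true) : pvTw l = l.length := by
  induction l with
  | nil => simp [pvTw]
  | cons a r ih => simp [pvTw, h a (by simp), ih (fun x hx => h x (List.mem_cons_of_mem _ hx))]

theorem pvTwr_all (l : List Char) (h : ∀ x ∈ l, pvIsTok x = true) : pvTwr l = l.length := by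
  simpa [pvTwr] using pvTw_all l.reverse (fun x hx => h x (List.mem_reverse.mp hx))

theorem pvScanRight_eq (cs : List Char) (fuel r : Nat) (h : cs.length ≤ r + fuel) :
    pvScanRight cs fuel r = r + pvTw (cs.drop r) := by
  induction fuel generalizing r with
  | zero =>
    have : cs.drop r = [] := List.drop_eq_nil_of_le (by omega)
    simp [pvScanRight, this, pvTw]
  | succ fuel ih =>
    simp only [pvScanRight]
    split
    · next hr =>
      rw [List.drop_eq_getElem_cons hr]
      by_cases ht : pvIsTok cs[r]
      · simp only [ht, if_true, pvTw, ih (r+1) (by omega)]; omega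
      · simp [ht, pvTw]
    · next hr =>
      have : cs.drop r = [] := List.drop_eq_nil_of_le (by omega)
      simp [this, pvTw]

theorem pvScanLeft_eq (cs : List Char) (k : Nat) (h : k ≤ cs.length) :
    pvScanLeft cs k = k - pvTwr (cs.take k) := by
  induction k with
  | zero => simp [pvScanLeft, pvTwr, pvTw]
  | succ k ih =>
    have hk : k < cs.length := by omega
    have htake : cs.take (k+1) = cs.take k ++ [cs[k]] := (List.take_concat_get' cs k hk).symm
    simp only [pvScanLeft, dif_pos hk]
    by_cases ht : pvIsTok cs[k]
    · have hle : pvTwr (cs.take k) ≤ k := by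
        have := pvTwr_le (cs.take k); rw [List.length_take] at this; omega
      rw [if_pos ht, htake, pvTwr_concat_pos _ _ ht, ih (by omega)]
      omega
    · rw [if_neg ht, htake, pvTwr_concat_neg _ _ (by simpa using ht)]
      omega

theorem pvSpansAux_shift (cs : List Char) : ∀ (i j : Nat) (st : Option Nat),
    pvSpansAux cs (i+j) (st.map (· + j)) = (pvSpansAux cs i st).map (fun p => (p.1 + j, p.2 + j)) := by
  induction cs with
  | nil => intro i j st; cases st <;> simp [pvSpansAux]
  | cons a r ih =>
    intro i j st
    by_cases ha : pvIsTok a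
    · have hgd : (st.map (· + j)).getD (i+j) = st.getD i + j := by cases st <;> simp
      simp only [pvSpansAux, ha, if_true, hgd]
      have := ih (i+1) j (some (st.getD i))
      simpa [Nat.add_right_comm i 1 j] using this
    · cases st with
      | none =>
        simp only [pvSpansAux, ha, Option.map_none]
        have := ih (i+1) j none
        simpa [Nat.add_right_comm i 1 j] using this
      | some s =>
        simp only [pvSpansAux, ha, Option.map_some]
        have := ih (i+1) j none
        simp only [Option.map_none] at this
        rw [Nat.add_right_comm i 1 j] at this
        simp [this]

theorem pvSpansAux_open (cs : List Char) : ∀ (i s : Nat),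
    pvSpansAux cs i (some s) = (s, i + pvTw cs) :: pvSpansAux (cs.drop (pvTw cs)) (i + pvTw cs) none := by
  induction cs with
  | nil => intro i s; simp [pvSpansAux, pvTw]
  | cons a r ih =>
    intro i s
    by_cases ha : pvIsTok a
    · simp only [pvSpansAux, ha, if_true, Option.getD_some, pvTw]
      have := ih (i+1) s
      simpa [Nat.add_comm, Nat.add_left_comm, Nat.add_assoc] using this
    · simp [pvSpansAux, pvTw, ha]

-- A's answer in closed form over the clamped caret
def pvAN (cs : List Char) (c : Nat) : Option (Nat × Nat) :=
  if c + pvTw (cs.drop c) ≤ c - pvTwr (cs.take c) then none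
  else some (c - pvTwr (cs.take c), c + pvTw (cs.drop c))

theorem pvMain : ∀ (N : Nat) (cs : List Char) (c : Nat), cs.length ≤ N → c ≤ cs.length →
    (pvSpansAux cs 0 none).find? (fun p => decide (p.1 ≤ c) && decide (c ≤ p.2)) = pvAN cs c := by
  intro N
  induction N with
  | zero =>
    intro cs c hN hc
    have : cs = [] := List.eq_nil_of_length_eq_zero (by omega)
    subst this
    simp only [List.length] at hc
    simp [pvSpansAux, pvAN, pvTw, pvTwr, Nat.le_zero.mp hc]
  | succ N ih =>
    intro cs c hN hc
    cases cs with
    | nil =>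
      simp only [List.length] at hc
      simp [pvSpansAux, pvAN, pvTw, pvTwr, Nat.le_zero.mp hc]
    | cons a rest =>
      by_cases ha : pvIsTok a
      · -- head is a token char: first span is (0, 1 + pvTw rest)
        set t := pvTw rest with ht
        have htle : t ≤ rest.length := pvTw_le rest
        have hspans : pvSpansAux (a :: rest) 0 none
            = (0, 1 + t) :: pvSpansAux (rest.drop t) (1 + t) none := by
          simp only [pvSpansAux, ha, if_true, Option.getD_none]
          simpa [Nat.add_comm] using pvSpansAux_open rest 1 0
        rw [hspans]
        by_cases hc1 : c ≤ 1 + t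
        · -- the first span touches the caret
          rw [List.find?_cons_of_pos (by simp [hc1])]
          have hL : pvTwr ((a :: rest).take c) = c := by
            cases c with
            | zero => simp [pvTwr, pvTw]
            | succ k =>
              have hk : k ≤ t := by omega
              have : (a :: rest).take (k+1) = a :: rest.take k := by simp
              rw [this, pvTwr_all]
              · simp [List.length_take]; omega
              · intro x hx
                rcases List.mem_cons.mp hx with rfl | hmem
                · exact ha
                · exact pvTw_take_mem rest k (by omega) x hmem
          have hR : c + pvTw ((a :: rest).drop c) = 1 + t := by
            cases c with
            | zero => simp [pvTw, ha, ht]; omega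
            | succ k =>
              have hk : k ≤ t := by omega
              have : (a :: rest).drop (k+1) = rest.drop k := by simp
              rw [this, pvTw_drop rest k (by omega)]
              omega
          simp only [pvAN, hL, hR, Nat.sub_self]
          rw [if_neg (by omega)]
        · -- caret lies beyond the first span
          rw [List.find?_cons_of_neg (by simp; omega)]
          set c' := c - (1 + t) with hc'
          have hdnil : rest.drop t ≠ [] := by
            have : t < rest.length := by
              simp only [List.length_cons] at hc; omega
            simp [List.drop_eq_nil_iff]; omega
          have hdlen : (rest.drop t).length = rest.length - t := by simp
          have hclen : c' ≤ (rest.drop t).length := by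
            simp only [List.length_cons] at hc; omega
          have hshift := pvSpansAux_shift (rest.drop t) 0 (1+t) none
          simp only [Option.map_none, Nat.zero_add] at hshift
          rw [hshift, List.find?_map]
          have hpred : ((fun p : Nat × Nat => decide (p.1 ≤ c) && decide (c ≤ p.2)) ∘
              (fun p : Nat × Nat => (p.1 + (1+t), p.2 + (1+t))))
              = fun p : Nat × Nat => decide (p.1 ≤ c') && decide (c' ≤ p.2) := by
            funext p
            simp only [Function.comp]
            congr 1 <;> rw [decide_eq_decide] <;> omega
          rw [hpred, ih (rest.drop t) c' (by simp only [List.length_cons] at hN; omega) hclen]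
          -- relate pvAN (a :: rest) c to pvAN (rest.drop t) c'
          have hdrop : (a :: rest).drop c = (rest.drop t).drop c' := by
            have h1 : (a :: rest).drop c = rest.drop (c - 1) := by
              cases c with
              | zero => omega
              | succ k => simp
            rw [h1, List.drop_drop]
            congr 1
            omega
          have htk0 : pvIsTok (rest.drop t)[0] = false := by
            have hlt : t < rest.length := by simp only [List.length_cons] at hc; omega
            have := pvTw_getElem rest (by omega)
            simpa [List.getElem_drop'] using this
          have htake : pvTwr ((a :: rest).take c) = pvTwr ((rest.drop t).take c') := by
            have h1 : (a :: rest).take c = a :: rest.take (c - 1) := by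
              cases c with
              | zero => omega
              | succ k => simp
            have h2 : rest.take (c-1) = rest.take t ++ (rest.drop t).take c' := by
              rw [show c - 1 = t + c' from by omega]
              exact List.take_add
            rw [h1, h2, show a :: (rest.take t ++ (rest.drop t).take c')
              = (a :: rest.take t) ++ (rest.drop t).take c' by simp]
            apply pvTwr_append_of_lt
            intro habs
            have hd0 : 0 < (rest.drop t).length := List.length_pos_iff.mpr hdnil
            have hlen0 : 0 < ((rest.drop t).take c').length := by
              rw [List.length_take]; omega
            have hmem : (rest.drop t)[0]'hd0 ∈ (rest.drop t).take c' := by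
              have h0 : ((rest.drop t).take c')[0]'hlen0 = (rest.drop t)[0]'hd0 := by
                simp [List.getElem_take]
              rw [← h0]
              exact List.getElem_mem hlen0
            have hlt := pvTw_lt_of_mem ((rest.drop t).take c').reverse ((rest.drop t)[0]'hd0)
              (List.mem_reverse.mpr hmem) htk0
            rw [List.length_reverse] at hlt
            simp only [pvTwr] at habs
            omega
          have hLle : pvTwr ((rest.drop t).take c') ≤ c' := by
            have := pvTwr_le ((rest.drop t).take c')
            rw [List.length_take] at this; omega
          simp only [pvAN, hdrop, htake]
          by_cases hif : c' + pvTw ((rest.drop t).drop c') ≤ c' - pvTwr ((rest.drop t).take c')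
          · rw [if_pos hif, if_pos (by omega)]
            rfl
          · rw [if_neg hif, if_neg (by omega)]
            simp only [Option.map_some, Option.some.injEq, Prod.mk.injEq]
            constructor <;> omega
      · -- head is not a token char
        have hspans : pvSpansAux (a :: rest) 0 none
            = (pvSpansAux rest 0 none).map (fun p => (p.1 + 1, p.2 + 1)) := by
          simp only [pvSpansAux, ha]
          have := pvSpansAux_shift rest 0 1 none
          simpa using this
        rw [hspans, List.find?_map]
        cases c with
        | zero =>
          have hpred : ((fun p : Nat × Nat => decide (p.1 ≤ 0) && decide (0 ≤ p.2)) ∘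
              (fun p : Nat × Nat => (p.1 + 1, p.2 + 1))) = fun _ : Nat × Nat => false := by
            funext p; simp [Function.comp]
          rw [hpred]
          simp [pvAN, pvTw, pvTwr, ha, List.find?_eq_none]
        | succ k =>
          have hpred : ((fun p : Nat × Nat => decide (p.1 ≤ k+1) && decide (k+1 ≤ p.2)) ∘
              (fun p : Nat × Nat => (p.1 + 1, p.2 + 1)))
              = fun p : Nat × Nat => decide (p.1 ≤ k) && decide (k ≤ p.2) := by
            funext p
            simp only [Function.comp]
            congr 1 <;> rw [decide_eq_decide] <;> omega
          rw [hpred, ih rest k (by simp only [List.length_cons] at hN; omega)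
            (by simp only [List.length_cons] at hc; omega)]
          have hdrop : (a :: rest).drop (k+1) = rest.drop k := by simp
          have htake : pvTwr ((a :: rest).take (k+1)) = pvTwr (rest.take k) := by
            simp only [List.take_succ_cons]
            exact pvTwr_cons_neg a _ (by simpa using ha)
          have hLle : pvTwr (rest.take k) ≤ k := by
            have := pvTwr_le (rest.take k); rw [List.length_take] at this; omega
          simp only [pvAN, hdrop, htake]
          by_cases hif : k + pvTw (rest.drop k) ≤ k - pvTwr (rest.take k)
          · rw [if_pos hif, if_pos (by omega)]
            rfl
          · rw [if_neg hif, if_neg (by omega)]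
            simp only [Option.map_some, Option.some.injEq, Prod.mk.injEq]
            constructor <;> omega

-- ===== VERDICT (by name: the statement is the Claim_ definition above) =====
theorem selected_token_range_py_spec : Claim_equal_selected_token_range_py := by
  intro text caret _
  unfold Spec_selected_token_range_py
  cases text with
  | none => rfl
  | some s =>
    simp only [selected_token_range_py, selected_token_range_py_alt]
    set cs := s.toList with hcs
    have hclamp : (if (if caret < 0 then 0 else caret) > (cs.length : Int) then (cs.length : Int)
        else (if caret < 0 then 0 else caret)) = max 0 (min caret (cs.length : Int)) := by
      split_ifs <;> omega
    rw [hclamp]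
    set c : Nat := (max 0 (min caret (cs.length : Int))).toNat with hcdef
    have hcle : c ≤ cs.length := by
      rw [hcdef]; omega
    rw [pvScanLeft_eq cs c hcle, pvScanRight_eq cs (cs.length - c) c (by omega),
      pvMain cs.length cs c le_rfl hcle]
    unfold pvAN
    split_ifs with h
    · rfl
    · rfl
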